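-- pv_equiv track=rewrite | github.com/viajucu/Pruebas-y-Calidad | A01797560_A4.2/P2/source/convertNumbers.py | parse_int_token
-- ===== SOURCE A (Python) =====
-- def parse_int_token(token):
--     """
--     Convierte un token a entero de forma segura, sin aceptar flotantes.
--
--     Reglas:
--     - Permite signo opcional + o -.
--     - Debe contener solo dígitos (después del signo).
--
--     Args:
--         token (str): texto a interpretar como entero
--
--     Returns:
--         int | None: entero si es válido, None si es inválido
--     """
--     if not token:
--         return None
--
--     sign = 1
--     start = 0
--
--     if token[0] == "-":
--         sign = -1
--         start = 1
--     elif token[0] == "+":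
--         start = 1
--
--     if start == len(token):
--         return None
--
--     value = 0
--     for ch in token[start:]:
--         if ch < "0" or ch > "9":
--             return None
--         value = value * 10 + (ord(ch) - ord("0"))
--
--     return sign * value
-- ===== SOURCE B (Python) =====
-- def parse_int_token(token):
--     """Slice-and-validate with str.isdigit, then evaluate the digits positionally."""
--     body = token[1:] if token[:1] in "+-" else token
--     if not body.isdigit():
--         return None
--     magnitude = sum((ord(c) - 48) * 10 ** i for i, c in enumerate(reversed(body)))
--     return -magnitude if token.startswith("-") else magnitude
-- ===== Notes on version B (the rewrite author's own statement) =====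
-- stated objective: alternative
-- what changed: Replaces A's manual first-character sign dispatch and left-to-right Horner accumulation with an early return inside the loop by slice-off-the-sign validation via str.isdigit followed by a positional powers-of-ten sum over the reversed digits.
import Mathlib
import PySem

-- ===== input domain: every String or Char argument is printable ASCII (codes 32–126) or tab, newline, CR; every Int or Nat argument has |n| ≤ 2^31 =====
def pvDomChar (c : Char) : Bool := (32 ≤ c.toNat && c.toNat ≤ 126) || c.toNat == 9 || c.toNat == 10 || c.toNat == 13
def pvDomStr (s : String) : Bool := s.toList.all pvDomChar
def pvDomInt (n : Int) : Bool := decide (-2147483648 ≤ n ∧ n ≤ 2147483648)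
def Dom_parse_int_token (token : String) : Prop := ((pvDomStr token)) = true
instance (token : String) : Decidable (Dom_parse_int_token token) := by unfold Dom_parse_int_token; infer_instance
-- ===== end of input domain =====

-- B replaces A's sign dispatch + Horner loop with slice/isdigit validation and a positional powers-of-ten sum (alternative decomposition, same cost).


-- ===== PORT A =====
-- A's digit loop: early 'return None' on a non-digit, else value = value*10 + (ord(ch)-48)
def pvLoopA : List Char → Int → Option Int
  | [], value => some value
  | ch :: rest, value =>
    if ch < '0' ∨ '9' < ch then none
    else pvLoopA rest (value * 10 + ((ch.toNat : Int) - 48))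

def parse_int_token (token : String) : Option Int :=
  match token.toList with
  | [] => none                                   -- if not token
  | c :: rest =>
    let sign : Int := if c = '-' then -1 else 1
    let digits := if c = '-' ∨ c = '+' then rest else c :: rest   -- start = 1 or 0; token[start:]
    if digits = [] then none                     -- start == len(token)
    else
      match pvLoopA digits 0 with
      | none => none
      | some value => some (sign * value)

-- ===== PORT B =====
-- sum((ord(c) - 48) * 10 ** i for i, c in enumerate(reversed(body)))
def pvMagnitude (body : List Char) : Int :=
  ((PySem.List.enumerate body.reverse).map (fun p => ((p.2.toNat : Int) - 48) * 10 ^ p.1.toNat)).sum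

def parse_int_token_alt (token : String) : Option Int :=
  let cs := token.toList
  -- token[:1] in "+-": a slice of length ≤ 1 is a substring of "+-" iff it is "", "+" or "-"
  let body := if cs.take 1 = [] ∨ cs.take 1 = ['+'] ∨ cs.take 1 = ['-'] then cs.drop 1 else cs
  -- body.isdigit(): nonempty and every character an ASCII digit (exact on the stated ASCII domain)
  if body ≠ [] ∧ body.all PySem.Chars.isdigit then
    some (if PySem.Str.startswith token "-" then -(pvMagnitude body) else pvMagnitude body)
  else none

-- ===== PRECONDITION & SPEC =====
def Spec_parse_int_token (token : String) (out : Option Int) : Prop := out = parse_int_token_alt token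
instance (token : String) (out : Option Int) : Decidable (Spec_parse_int_token token out) := by unfold Spec_parse_int_token; infer_instance

-- ===== CLAIM (what is proved, stated in full; the proofs are below) =====
def Claim_equal_parse_int_token : Prop := ∀ (token : String), Dom_parse_int_token token → Spec_parse_int_token token (parse_int_token token)

-- ===== LEMMAS AND PROOFS =====
theorem pv_enumerate_append_singleton {α : Type} (xs : List α) (x : α) (s : Int) :
    PySem.List.enumerate (xs ++ [x]) s = PySem.List.enumerate xs s ++ [(s + xs.length, x)] := by
  induction xs generalizing s with
  | nil => simp [PySem.List.enumerate_cons, PySem.List.enumerate_nil]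
  | cons y ys ih =>
    simp only [List.cons_append, PySem.List.enumerate_cons, ih, List.length_cons]
    have : (s + 1 + (ys.length : Int)) = s + ((ys.length + 1 : Nat) : Int) := by push_cast; ring
    rw [this]

theorem pvMagnitude_nil : pvMagnitude [] = 0 := by
  simp [pvMagnitude, PySem.List.enumerate_nil]

theorem pvMagnitude_cons (c : Char) (cs : List Char) :
    pvMagnitude (c :: cs) = ((c.toNat : Int) - 48) * 10 ^ cs.length + pvMagnitude cs := by
  simp only [pvMagnitude, List.reverse_cons, pv_enumerate_append_singleton, List.map_append,
    List.sum_append, List.map_cons, List.map_nil, List.sum_cons, List.sum_nil, List.length_reverse]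
  have : ((0 : Int) + (cs.length : Int)).toNat = cs.length := by omega
  rw [this]
  ring

theorem pvLoopA_digits (cs : List Char) (h : cs.all PySem.Chars.isdigit) (v : Int) :
    pvLoopA cs v = some (v * 10 ^ cs.length + pvMagnitude cs) := by
  induction cs generalizing v with
  | nil => simp [pvLoopA, pvMagnitude_nil]
  | cons c rest ih =>
    simp only [List.all_cons, Bool.and_eq_true, PySem.Chars.isdigit, decide_eq_true_eq] at h
    rw [pvLoopA, if_neg (by rw [not_or, not_lt, not_lt]; exact ⟨h.1.1, h.1.2⟩), ih h.2,
      pvMagnitude_cons]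
    congr 1
    simp only [List.length_cons]
    ring

theorem pvLoopA_bad (cs : List Char) (h : ¬ cs.all PySem.Chars.isdigit = true) (v : Int) :
    pvLoopA cs v = none := by
  induction cs generalizing v with
  | nil => simp at h
  | cons c rest ih =>
    by_cases hc : c < '0' ∨ '9' < c
    · rw [pvLoopA, if_pos hc]
    · rw [pvLoopA, if_neg hc]
      apply ih
      intro hrest
      apply h
      rw [not_or, not_lt, not_lt] at hc
      simp [List.all_cons, PySem.Chars.isdigit, hc.1, hc.2, hrest]

-- the common core: both ports return 'the signed magnitude of the digit tail, when it is valid'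
theorem pv_core (token : String) (cs : List Char) (h : token.toList = cs) :
    parse_int_token token = parse_int_token_alt token := by
  cases cs with
  | nil =>
    simp [parse_int_token, parse_int_token_alt, h]
  | cons c rest =>
    by_cases hm : c = '-'
    · subst hm
      cases rest with
      | nil => simp [parse_int_token, parse_int_token_alt, h]
      | cons d ds =>
        by_cases hall : (d :: ds).all PySem.Chars.isdigit = true
        · simp [parse_int_token, parse_int_token_alt, h, PySem.Str.startswith,
            PySem.Chars.startswith, List.isPrefixOf, pvLoopA_digits _ hall 0, hall]
        · simp [parse_int_token, parse_int_token_alt, h, pvLoopA_bad _ hall 0, hall]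
    · by_cases hp : c = '+'
      · subst hp
        cases rest with
        | nil => simp [parse_int_token, parse_int_token_alt, h]
        | cons d ds =>
          by_cases hall : (d :: ds).all PySem.Chars.isdigit = true
          · simp [parse_int_token, parse_int_token_alt, h, PySem.Str.startswith,
              PySem.Chars.startswith, List.isPrefixOf, pvLoopA_digits _ hall 0, hall]
          · simp [parse_int_token, parse_int_token_alt, h, pvLoopA_bad _ hall 0, hall]
      · have hbm : ('-' == c) = false := beq_eq_false_iff_ne.mpr (fun hcc => hm hcc.symm)
        by_cases hall : (c :: rest).all PySem.Chars.isdigit = true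
        · simp [parse_int_token, parse_int_token_alt, h, hm, hp, hbm, PySem.Str.startswith,
            PySem.Chars.startswith, List.isPrefixOf, pvLoopA_digits _ hall 0, hall]
        · simp [parse_int_token, parse_int_token_alt, h, hm, hp,
            pvLoopA_bad _ hall 0, hall]

-- ===== VERDICT (by name: the statement is the Claim_ definition above) =====
theorem parse_int_token_spec : Claim_equal_parse_int_token := by
  intro token _
  exact pv_core token token.toList rfl
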